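-- pv_equiv track=rewrite | github.com/NeilVibe/VRS-Manager | src/core/change_detection.py | get_priority_change
-- ===== SOURCE A (Python) =====
-- PRIORITY_RANKING = {
--     "StrOrigin": 1,
--     "Desc": 2,
--     "CastingKey": 3,
--     "TimeFrame": 4,
--     "Group": 5,
--     "EventName": 6,
--     "SequenceName": 7,
--     "DialogType": 8,
--     "CharacterGroup": 9,
-- }
--
-- def get_priority_change(change_label: str) -> str:
--     """
--     Extract the highest priority change from a composite label.
--
--     For standalone changes and special labels (New Row, No Change),
--     returns the label as-is.
--
--     For composites like "EventName+StrOrigin+Desc Change", returns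
--     only the highest priority component: "StrOrigin Change"
--
--     Args:
--         change_label: The full change label (e.g., "EventName+StrOrigin+Desc Change")
--
--     Returns:
--         str: Priority change label (e.g., "StrOrigin Change")
--
--     Example:
--         >>> get_priority_change("EventName+StrOrigin+Desc Change")
--         "StrOrigin Change"
--         >>> get_priority_change("TimeFrame Change")
--         "TimeFrame Change"
--         >>> get_priority_change("New Row")
--         "New Row"
--     """
--     # Special cases - return as-is
--     if not change_label or change_label in ("New Row", "No Change", "No Relevant Change"):
--         return change_label
--
--     # Must end with " Change" to be a valid change label
--     if not change_label.endswith(" Change"):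
--         return change_label
--
--     # Extract the change types part (remove " Change" suffix)
--     change_part = change_label[:-7]  # Remove " Change"
--
--     # Split by "+" for composites
--     components = change_part.split("+")
--
--     # If only one component, it's standalone - return as-is
--     if len(components) == 1:
--         return change_label
--
--     # Find highest priority (lowest rank number)
--     best_component = None
--     best_rank = float('inf')
--
--     for component in components:
--         rank = PRIORITY_RANKING.get(component, 999)
--         if rank < best_rank:
--             best_rank = rank
--             best_component = component
--
--     if best_component:
--         return f"{best_component} Change"
--
--     # Fallback - return original
--     return change_label
-- ===== SOURCE B (Python) =====
-- PRIORITY_RANKING = {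
--     "StrOrigin": 1,
--     "Desc": 2,
--     "CastingKey": 3,
--     "TimeFrame": 4,
--     "Group": 5,
--     "EventName": 6,
--     "SequenceName": 7,
--     "DialogType": 8,
--     "CharacterGroup": 9,
-- }
--
-- def get_priority_change(change_label: str) -> str:
--     # Same guards as the original, then walk the priority table in rank order
--     # with membership tests, instead of min-scanning the component list.
--     if not change_label or change_label in ("New Row", "No Change", "No Relevant Change"):
--         return change_label
--     if not change_label.endswith(" Change"):
--         return change_label
--     components = change_label[:-7].split("+")
--     if len(components) == 1:
--         return change_label
--     for name in PRIORITY_RANKING: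
--         if name in components:
--             return f"{name} Change"
--     first = components[0]
--     return f"{first} Change" if first else change_label
-- ===== Notes on version B (the rewrite author's own statement) =====
-- stated objective: idiomatic
-- what changed: Instead of A's min-scan over the components tracking (best_component, best_rank) with an infinite initial rank, B walks PRIORITY_RANKING's keys in rank order and returns the first one that is among the components, falling back to components[0].
import Mathlib
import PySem

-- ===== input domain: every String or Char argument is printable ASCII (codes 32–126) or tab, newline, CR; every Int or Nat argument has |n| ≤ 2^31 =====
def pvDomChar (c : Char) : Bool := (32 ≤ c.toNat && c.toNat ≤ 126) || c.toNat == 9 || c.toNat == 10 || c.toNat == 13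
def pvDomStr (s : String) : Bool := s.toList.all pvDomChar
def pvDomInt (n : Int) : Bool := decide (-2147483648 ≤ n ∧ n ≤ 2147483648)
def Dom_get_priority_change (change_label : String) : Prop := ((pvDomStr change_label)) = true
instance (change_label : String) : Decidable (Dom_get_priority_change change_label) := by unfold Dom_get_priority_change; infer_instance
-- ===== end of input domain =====

-- B replaces A's min-scan over the components (best_component/best_rank with an infinite
-- initial rank) by a walk over PRIORITY_RANKING's keys in rank order, returning the first
-- key present among the components (objective: idiomatic).


-- ===== PORT A =====
def PRIORITY_RANKING : PySem.Dict String Int := PySem.Dict.ofList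
  [("StrOrigin", 1), ("Desc", 2), ("CastingKey", 3), ("TimeFrame", 4), ("Group", 5),
   ("EventName", 6), ("SequenceName", 7), ("DialogType", 8), ("CharacterGroup", 9)]

-- PRIORITY_RANKING.get(component, 999)
def pvRank (component : String) : Int := (PRIORITY_RANKING.get? component).getD 999

def get_priority_change (change_label : String) : String :=
  if change_label = "" ∨ change_label = "New Row" ∨ change_label = "No Change" ∨ change_label = "No Relevant Change" then
    change_label
  else if ¬ (PySem.Str.endswith change_label " Change" = true) then
    change_label
  else
    let change_part := PySem.Str.slice change_label none (some (-7))
    -- split never raises for a nonempty separator: the getD [] default is unreachable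
    let components := (PySem.Str.split? change_part "+").getD []
    if components.length = 1 then change_label
    else
      -- the infinite initial best_rank is modelled as `none`; every rank compares below it
      let st := components.foldl
        (fun (st : Option String × Option Int) component =>
          let rank := pvRank component
          if (match st.2 with | none => true | some r => decide (rank < r)) = true
          then (some component, some rank) else st)
        (none, none)
      match st.1 with
      | some best => if best ≠ "" then best ++ " Change" else change_label
      | none => change_label

-- ===== PORT B =====
-- for name in PRIORITY_RANKING: if name in components: return name + " Change"
def pvFindRanked : List (String × Int) → List String → Option String
  | [], _ => none
  | (n, _) :: rest, comps => if n ∈ comps then some n else pvFindRanked rest comps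

def get_priority_change_alt (change_label : String) : String :=
  if change_label = "" ∨ change_label = "New Row" ∨ change_label = "No Change" ∨ change_label = "No Relevant Change" then
    change_label
  else if ¬ (PySem.Str.endswith change_label " Change" = true) then
    change_label
  else
    let components := (PySem.Str.split? (PySem.Str.slice change_label none (some (-7))) "+").getD []
    if components.length = 1 then change_label
    else
      match pvFindRanked PRIORITY_RANKING.items components with
      | some n => n ++ " Change"
      | none =>
        -- components[0]; Python's split always yields a nonempty list, so the default is unreachable
        let first := components.headD ""
        if first ≠ "" then first ++ " Change" else change_label

-- ===== PRECONDITION & SPEC =====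
def Spec_get_priority_change (change_label : String) (out : String) : Prop := out = get_priority_change_alt change_label
instance (change_label : String) (out : String) : Decidable (Spec_get_priority_change change_label out) := by unfold Spec_get_priority_change; infer_instance

-- ===== CLAIM (what is proved, stated in full; the proofs are below) =====
def Claim_equal_get_priority_change : Prop := ∀ (change_label : String), Dom_get_priority_change change_label → Spec_get_priority_change change_label (get_priority_change change_label)

-- ===== LEMMAS AND PROOFS =====

-- the body of A's loop, with the redundant best_rank component dropped
def pvStep (b c : String) : String := if pvRank c < pvRank b then c else b

lemma pvItems : PRIORITY_RANKING.items =
    [("StrOrigin", 1), ("Desc", 2), ("CastingKey", 3), ("TimeFrame", 4), ("Group", 5),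
     ("EventName", 6), ("SequenceName", 7), ("DialogType", 8), ("CharacterGroup", 9)] := by decide

lemma pvRank_of_mem : ∀ p ∈ PRIORITY_RANKING.items, pvRank p.1 = p.2 := by decide

lemma pvVal_lt : ∀ p ∈ PRIORITY_RANKING.items, p.2 < 999 := by decide

lemma pvPairwise : PRIORITY_RANKING.items.Pairwise (fun p q => p.2 < q.2) := by decide

lemma pvKeyOfVal : ∀ p ∈ PRIORITY_RANKING.items, ∀ q ∈ PRIORITY_RANKING.items, p.2 = q.2 → p.1 = q.1 := by decide

lemma pvMem_of_rank (n : String) (h : pvRank n ≠ 999) : (n, pvRank n) ∈ PRIORITY_RANKING.items := by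
  by_cases h1 : n = "StrOrigin"
  · subst h1; decide
  by_cases h2 : n = "Desc"
  · subst h2; decide
  by_cases h3 : n = "CastingKey"
  · subst h3; decide
  by_cases h4 : n = "TimeFrame"
  · subst h4; decide
  by_cases h5 : n = "Group"
  · subst h5; decide
  by_cases h6 : n = "EventName"
  · subst h6; decide
  by_cases h7 : n = "SequenceName"
  · subst h7; decide
  by_cases h8 : n = "DialogType"
  · subst h8; decide
  by_cases h9 : n = "CharacterGroup"
  · subst h9; decide
  exfalso
  apply h
  have e1 : ("StrOrigin" == n) = false := beq_eq_false_iff_ne.mpr (Ne.symm h1)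
  have e2 : ("Desc" == n) = false := beq_eq_false_iff_ne.mpr (Ne.symm h2)
  have e3 : ("CastingKey" == n) = false := beq_eq_false_iff_ne.mpr (Ne.symm h3)
  have e4 : ("TimeFrame" == n) = false := beq_eq_false_iff_ne.mpr (Ne.symm h4)
  have e5 : ("Group" == n) = false := beq_eq_false_iff_ne.mpr (Ne.symm h5)
  have e6 : ("EventName" == n) = false := beq_eq_false_iff_ne.mpr (Ne.symm h6)
  have e7 : ("SequenceName" == n) = false := beq_eq_false_iff_ne.mpr (Ne.symm h7)
  have e8 : ("DialogType" == n) = false := beq_eq_false_iff_ne.mpr (Ne.symm h8)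
  have e9 : ("CharacterGroup" == n) = false := beq_eq_false_iff_ne.mpr (Ne.symm h9)
  simp [pvRank, PySem.Dict.get?, pvItems, List.find?, e1, e2, e3, e4, e5, e6, e7, e8, e9]

lemma pvRank_inj (x y : String) (hx : pvRank x ≠ 999) (h : pvRank x = pvRank y) : x = y := by
  have h1 := pvMem_of_rank x hx
  have h2 := pvMem_of_rank y (by omega)
  rw [h] at h1
  exact (pvKeyOfVal _ h2 _ h1 rfl).symm

-- characterisation of B's table walk over any rank-sorted table
lemma pvFind_some_char (d : List (String × Int)) :
    d.Pairwise (fun p q => p.2 < q.2) →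
    ∀ (l : List String) (n : String),
      pvFindRanked d l = some n ↔ ∃ r, (n, r) ∈ d ∧ n ∈ l ∧ ∀ p ∈ d, p.1 ∈ l → r ≤ p.2 := by
  induction d with
  | nil => intro _ l n; simp [pvFindRanked]
  | cons p rest ih =>
    rintro hpw l n
    obtain ⟨a, ra⟩ := p
    rw [List.pairwise_cons] at hpw
    obtain ⟨hhead, htail⟩ := hpw
    simp only [pvFindRanked]
    split_ifs with ha
    · constructor
      · rintro ⟨rfl⟩
        refine ⟨ra, by simp, ha, ?_⟩
        rintro q hq hql
        rcases List.mem_cons.mp hq with rfl | hq'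
        · omega
        · exact le_of_lt (hhead q hq')
      · rintro ⟨r, hmem, hin, hmin⟩
        rcases List.mem_cons.mp hmem with heq | hmem'
        · rw [Prod.mk.injEq] at heq
          simp [heq.1]
        · have hlt : ra < r := hhead _ hmem'
          have hle : r ≤ ra := hmin (a, ra) (by simp) ha
          omega
    · rw [ih htail l n]
      constructor
      · rintro ⟨r, hmem, hin, hmin⟩
        refine ⟨r, by simp [hmem], hin, ?_⟩
        rintro q hq hql
        rcases List.mem_cons.mp hq with rfl | hq'
        · exact absurd hql ha
        · exact hmin q hq' hql
      · rintro ⟨r, hmem, hin, hmin⟩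
        rcases List.mem_cons.mp hmem with heq | hmem'
        · rw [Prod.mk.injEq] at heq
          exact absurd (heq.1 ▸ hin) ha
        · exact ⟨r, hmem', hin, fun q hq hql => hmin q (by simp [hq]) hql⟩

lemma pvFind_none_char (d : List (String × Int)) (l : List String) :
    pvFindRanked d l = none ↔ ∀ p ∈ d, p.1 ∉ l := by
  induction d with
  | nil => simp [pvFindRanked]
  | cons p rest ih =>
    obtain ⟨n, r⟩ := p
    simp only [pvFindRanked]
    split_ifs with h <;> simp_all

-- specialised to PRIORITY_RANKING, in terms of pvRank only
lemma pvFind_some_iff (l : List String) (n : String) :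
    pvFindRanked PRIORITY_RANKING.items l = some n ↔
      n ∈ l ∧ pvRank n ≠ 999 ∧ ∀ x ∈ l, pvRank n ≤ pvRank x := by
  rw [pvFind_some_char _ pvPairwise]
  constructor
  · rintro ⟨r, hmem, hin, hmin⟩
    have hr : pvRank n = r := pvRank_of_mem _ hmem
    have hlt : r < 999 := pvVal_lt _ hmem
    refine ⟨hin, by omega, fun x hx => ?_⟩
    by_cases h9 : pvRank x = 999
    · omega
    · have := hmin _ (pvMem_of_rank x h9) hx
      omega
  · rintro ⟨hin, h9, hmin⟩
    exact ⟨pvRank n, pvMem_of_rank n h9, hin, fun p hp hpl => by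
      have := pvRank_of_mem _ hp
      have := hmin _ hpl
      omega⟩

lemma pvFind_none_iff (l : List String) :
    pvFindRanked PRIORITY_RANKING.items l = none ↔ ∀ x ∈ l, pvRank x = 999 := by
  rw [pvFind_none_char]
  constructor
  · intro h x hx
    by_contra h9
    exact h _ (pvMem_of_rank x h9) hx
  · intro h p hp hpl
    have h1 := pvRank_of_mem _ hp
    have h2 := pvVal_lt _ hp
    have := h _ hpl
    omega

-- A's fold carries best_rank = pvRank best redundantly
lemma pvFold_pair (rest : List String) : ∀ b : String,
    rest.foldl
      (fun (st : Option String × Option Int) component =>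
        let rank := pvRank component
        if (match st.2 with | none => true | some r => decide (rank < r)) = true
        then (some component, some rank) else st)
      (some b, some (pvRank b))
    = (some (rest.foldl pvStep b), some (pvRank (rest.foldl pvStep b))) := by
  induction rest with
  | nil => intro b; rfl
  | cons c rest ih =>
    intro b
    simp only [List.foldl_cons, pvStep]
    by_cases h : pvRank c < pvRank b <;> simp [h, ih]

-- the single exchange step: replacing the two leading components by the better one
lemma pvPhi_step (b c : String) (t : List String) :
    (match pvFindRanked PRIORITY_RANKING.items (pvStep b c :: t) with
     | some n => n | none => pvStep b c)
    = (match pvFindRanked PRIORITY_RANKING.items (b :: c :: t) with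
       | some n => n | none => b) := by
  cases h : pvFindRanked PRIORITY_RANKING.items (b :: c :: t) with
  | none =>
    rw [pvFind_none_iff] at h
    have hb : pvRank b = 999 := h _ (by simp)
    have hc : pvRank c = 999 := h _ (by simp)
    have hm : pvStep b c = b := by simp [pvStep, hb, hc]
    have hnone : pvFindRanked PRIORITY_RANKING.items (pvStep b c :: t) = none := by
      rw [pvFind_none_iff]
      intro x hx
      rcases List.mem_cons.mp hx with h1 | h1
      · rw [h1, hm]; exact hb
      · exact h _ (by simp [h1])
    rw [hnone, hm]
  | some n =>
    rw [pvFind_some_iff] at h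
    obtain ⟨hin, h9, hmin⟩ := h
    have hnew : pvFindRanked PRIORITY_RANKING.items (pvStep b c :: t) = some n := by
      rw [pvFind_some_iff]
      refine ⟨?_, h9, fun x hx => ?_⟩
      · rcases List.mem_cons.mp hin with h1 | h1
        · subst h1
          have hcb : ¬ pvRank c < pvRank n := by
            have := hmin c (by simp)
            omega
          simp [pvStep, hcb]
        · rcases List.mem_cons.mp h1 with h2 | h2
          · subst h2
            by_cases hcb : pvRank n < pvRank b
            · simp [pvStep, hcb]
            · have hle := hmin b (by simp)
              have heq : pvRank n = pvRank b := by omega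
              have hnb := pvRank_inj n b h9 heq
              simp [pvStep, hnb]
          · simp [h2]
      · rcases List.mem_cons.mp hx with h1 | h1
        · subst h1
          by_cases hcb : pvRank c < pvRank b
          · simpa [pvStep, hcb] using hmin c (by simp)
          · simpa [pvStep, hcb] using hmin b (by simp)
        · exact hmin x (by simp [h1])
    rw [hnew]

-- A's min-scan equals B's table walk (with the head as fallback)
lemma pvFold_phi (rest : List String) : ∀ b : String,
    rest.foldl pvStep b
    = (match pvFindRanked PRIORITY_RANKING.items (b :: rest) with
       | some n => n | none => b) := by
  induction rest with
  | nil =>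
    intro b
    cases h : pvFindRanked PRIORITY_RANKING.items [b] with
    | none => rfl
    | some n =>
      rw [pvFind_some_iff] at h
      have : n = b := by simpa using h.1
      simp [this]
  | cons c rest ih =>
    intro b
    rw [List.foldl_cons, ih (pvStep b c), pvPhi_step]

lemma pvRank_empty : pvRank "" = 999 := by decide

-- the post-guard cores of the two programs agree on any component list
lemma pvCore (lab : String) (comps : List String) :
    (match (comps.foldl
        (fun (st : Option String × Option Int) component =>
          let rank := pvRank component
          if (match st.2 with | none => true | some r => decide (rank < r)) = true
          then (some component, some rank) else st)
        (none, none)).1 with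
     | some best => if best ≠ "" then best ++ " Change" else lab
     | none => lab)
    = (match pvFindRanked PRIORITY_RANKING.items comps with
       | some n => n ++ " Change"
       | none => if comps.headD "" ≠ "" then comps.headD "" ++ " Change" else lab) := by
  cases comps with
  | nil => simp [pvFindRanked, pvItems]
  | cons c rest =>
    have hstart : (c :: rest).foldl
        (fun (st : Option String × Option Int) component =>
          let rank := pvRank component
          if (match st.2 with | none => true | some r => decide (rank < r)) = true
          then (some component, some rank) else st)
        (none, none)
      = rest.foldl
        (fun (st : Option String × Option Int) component =>
          let rank := pvRank component
          if (match st.2 with | none => true | some r => decide (rank < r)) = true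
          then (some component, some rank) else st)
        (some c, some (pvRank c)) := by
      simp only [List.foldl_cons]
      simp
    rw [hstart, pvFold_pair, pvFold_phi]
    cases h : pvFindRanked PRIORITY_RANKING.items (c :: rest) with
    | some n =>
      have h9 : pvRank n ≠ 999 := ((pvFind_some_iff _ _).mp h).2.1
      have hne : n ≠ "" := fun he => h9 (he ▸ pvRank_empty)
      simp [hne]
    | none => simp

-- pvCore with the len(components) == 1 guard attached
lemma pvCore' (lab : String) (comps : List String) :
    (if comps.length = 1 then lab else
      (match (comps.foldl
          (fun (st : Option String × Option Int) component =>
            let rank := pvRank component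
            if (match st.2 with | none => true | some r => decide (rank < r)) = true
            then (some component, some rank) else st)
          (none, none)).1 with
       | some best => if best ≠ "" then best ++ " Change" else lab
       | none => lab))
    = (if comps.length = 1 then lab else
      (match pvFindRanked PRIORITY_RANKING.items comps with
       | some n => n ++ " Change"
       | none => if comps.headD "" ≠ "" then comps.headD "" ++ " Change" else lab)) := by
  by_cases h : comps.length = 1
  · rw [if_pos h, if_pos h]
  · rw [if_neg h, if_neg h]
    exact pvCore lab comps

-- ===== VERDICT (by name: the statement is the Claim_ definition above) =====
set_option maxHeartbeats 2000000 in
theorem get_priority_change_spec : Claim_equal_get_priority_change := by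
  intro change_label _
  show get_priority_change change_label = get_priority_change_alt change_label
  rw [get_priority_change, get_priority_change_alt]
  by_cases h1 : change_label = "" ∨ change_label = "New Row" ∨ change_label = "No Change" ∨ change_label = "No Relevant Change"
  · rw [if_pos h1, if_pos h1]
  rw [if_neg h1, if_neg h1]
  by_cases h2 : ¬ (PySem.Str.endswith change_label " Change" = true)
  · rw [if_pos h2, if_pos h2]
  rw [if_neg h2, if_neg h2]
  exact pvCore' change_label ((PySem.Str.split? (PySem.Str.slice change_label none (some (-7))) "+").getD [])
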